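-- pv_equiv track=rewrite | github.com/reyramon/Resume | generate_resume.py | add_experience_role_spacing
-- ===== SOURCE A (Python) =====
-- def add_experience_role_spacing(text: str) -> str:
--     """
--     In the Professional Experience section, add a blank line between the
--     company line and the job title line when both are bold markdown lines.
--     """
--     lines = text.replace("\r\n", "\n").replace("\r", "\n").split("\n")
--     result = []
--     in_experience = False
--
--     for index, line in enumerate(lines):
--         if line.startswith("## "):
--             in_experience = line == "## Professional Experience"
--
--         result.append(line)
--
--         if not in_experience:
--             continue
--
--         next_line = lines[index + 1] if index + 1 < len(lines) else ""
--         current_looks_like_company = (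
--             line.startswith("**") and "|" not in line and next_line.startswith("**")
--         )
--         next_looks_like_title = "|" in next_line
--
--         if current_looks_like_company and next_looks_like_title:
--             result.append("")
--
--     return "\n".join(result)
-- ===== SOURCE B (Python) =====
-- def add_experience_role_spacing(text: str) -> str:
--     lines = text.replace("\r\n", "\n").replace("\r", "\n").split("\n")
--     # Pass 1: collect the indices after which a blank line must be inserted.
--     insert_after = set()
--     in_experience = False
--     for i, line in enumerate(lines):
--         if line.startswith("## "):
--             in_experience = line == "## Professional Experience"
--         if in_experience and line.startswith("**") and "|" not in line:
--             nxt = lines[i + 1] if i + 1 < len(lines) else ""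
--             if nxt.startswith("**") and "|" in nxt:
--                 insert_after.add(i)
--     # Pass 2: rebuild by flattening each line into itself plus an optional blank.
--     return "\n".join(x for i, line in enumerate(lines)
--                      for x in ((line, "") if i in insert_after else (line,)))
-- ===== Notes on version B (the rewrite author's own statement) =====
-- stated objective: alternative
-- what changed: A appends lines and blank separators in a single accumulating loop; B first collects the set of indices after which a blank must be inserted, then rebuilds the output in a separate flattening pass.
import Mathlib
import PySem

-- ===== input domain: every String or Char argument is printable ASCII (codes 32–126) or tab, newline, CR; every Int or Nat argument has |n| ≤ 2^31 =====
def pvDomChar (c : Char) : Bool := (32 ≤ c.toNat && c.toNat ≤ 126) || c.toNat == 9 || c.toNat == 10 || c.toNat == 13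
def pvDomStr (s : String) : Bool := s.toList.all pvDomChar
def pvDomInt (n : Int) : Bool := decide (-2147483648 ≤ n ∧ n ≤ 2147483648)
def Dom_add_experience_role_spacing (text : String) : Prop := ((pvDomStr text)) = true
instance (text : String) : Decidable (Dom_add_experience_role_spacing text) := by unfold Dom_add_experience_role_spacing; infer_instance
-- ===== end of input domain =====

set_option maxHeartbeats 1000000

-- B replaces A's single append-as-you-go loop by two passes (collect the set of
-- insertion indices, then rebuild by flattening); alternative decomposition, same cost.

-- shared first line of both Pythons: normalize line endings and split on "\n"
def pvLines (text : String) : List String :=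
  (PySem.Str.split? (PySem.Str.replace (PySem.Str.replace text "\r\n" "\n") "\r" "\n") "\n").getD []

-- lines[index + 1] if index + 1 < len(lines) else ""
def pvNextAt (lines : List String) (i : Int) : String :=
  if i + 1 < (lines.length : Int) then PySem.List.pyGetD lines (i + 1) "" else ""

-- ===== PORT A =====
-- loop body of A
def aStep (lines : List String) (st : List String × Bool) (p : Int × String) : List String × Bool :=
  let in_experience :=
    if PySem.Str.startswith p.2 "## " then p.2 == "## Professional Experience" else st.2
  let result := st.1 ++ [p.2]
  if !in_experience then (result, in_experience)
  else
    let next_line := pvNextAt lines p.1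
    let current_looks_like_company :=
      PySem.Str.startswith p.2 "**" && !PySem.Str.isIn "|" p.2 && PySem.Str.startswith next_line "**"
    let next_looks_like_title := PySem.Str.isIn "|" next_line
    if current_looks_like_company && next_looks_like_title then (result ++ [""], in_experience)
    else (result, in_experience)

def add_experience_role_spacing (text : String) : String :=
  let lines := pvLines text
  PySem.Str.join "\n" ((PySem.List.enumerate lines 0).foldl (aStep lines) ([], false)).1

-- ===== PORT B =====
-- loop body of B's first pass: collect the indices after which a blank is inserted
def bStep (lines : List String) (st : PySem.Set Int × Bool) (p : Int × String) : PySem.Set Int × Bool :=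
  let in_experience :=
    if PySem.Str.startswith p.2 "## " then p.2 == "## Professional Experience" else st.2
  if in_experience && PySem.Str.startswith p.2 "**" && !PySem.Str.isIn "|" p.2 then
    let nxt := pvNextAt lines p.1
    if PySem.Str.startswith nxt "**" && PySem.Str.isIn "|" nxt then (PySem.Set.add st.1 p.1, in_experience)
    else (st.1, in_experience)
  else (st.1, in_experience)

def add_experience_role_spacing_alt (text : String) : String :=
  let lines := pvLines text
  let insert_after := ((PySem.List.enumerate lines 0).foldl (bStep lines) (PySem.Set.empty, false)).1
  -- second pass: rebuild by flattening each line into itself plus an optional blank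
  PySem.Str.join "\n"
    ((PySem.List.enumerate lines 0).flatMap
      (fun p => if PySem.Set.contains insert_after p.1 then [p.2, ""] else [p.2]))

-- ===== PRECONDITION & SPEC =====
def Spec_add_experience_role_spacing (text : String) (out : String) : Prop := out = add_experience_role_spacing_alt text
instance (text : String) (out : String) : Decidable (Spec_add_experience_role_spacing text out) := by unfold Spec_add_experience_role_spacing; infer_instance

-- ===== CLAIM (what is proved, stated in full; the proofs are below) =====
def Claim_equal_add_experience_role_spacing : Prop := ∀ (text : String), Dom_add_experience_role_spacing text → Spec_add_experience_role_spacing text (add_experience_role_spacing text)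

-- ===== LEMMAS AND PROOFS =====

-- the next-iteration flag, as both loops update it
def pvFlag (line : String) (f : Bool) : Bool :=
  if PySem.Str.startswith line "## " then line == "## Professional Experience" else f

-- whether a blank is inserted after `line` (given the updated flag f and the next line nxt)
def pvCond (line nxt : String) (f : Bool) : Bool :=
  f && (PySem.Str.startswith line "**" && !PySem.Str.isIn "|" line && PySem.Str.startswith nxt "**")
    && PySem.Str.isIn "|" nxt

-- reference spine: the output line list for a suffix, given the incoming flag
def pvSpine : List String → Bool → List String
  | [], _ => []
  | x :: rest, f =>
    let f' := pvFlag x f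
    x :: ((if pvCond x (rest.getD 0 "") f' then [""] else []) ++ pvSpine rest f')

-- reference insertion indices for a suffix starting at position k
def pvIns : List String → Nat → Bool → List Int
  | [], _, _ => []
  | x :: rest, k, f =>
    let f' := pvFlag x f
    (if pvCond x (rest.getD 0 "") f' then [(k : Int)] else []) ++ pvIns rest (k + 1) f'

lemma aStep_eq (lines : List String) (st : List String × Bool) (p : Int × String) :
    aStep lines st p
      = (st.1 ++ p.2 :: (if pvCond p.2 (pvNextAt lines p.1) (pvFlag p.2 st.2) then [""] else []),
         pvFlag p.2 st.2) := by
  simp only [aStep, pvCond, pvFlag]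
  rcases Bool.eq_false_or_eq_true
      (if PySem.Str.startswith p.2 "## " then p.2 == "## Professional Experience" else st.2) with h | h <;>
    simp only [h] <;> simp
  all_goals split <;> rfl

lemma bStep_eq (lines : List String) (st : PySem.Set Int × Bool) (p : Int × String) :
    bStep lines st p
      = ((if pvCond p.2 (pvNextAt lines p.1) (pvFlag p.2 st.2) then PySem.Set.add st.1 p.1 else st.1),
         pvFlag p.2 st.2) := by
  simp only [bStep, pvCond, pvFlag]
  rcases Bool.eq_false_or_eq_true
      (if PySem.Str.startswith p.2 "## " then p.2 == "## Professional Experience" else st.2) with h | h <;>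
    simp only [h] <;>
    rcases Bool.eq_false_or_eq_true (PySem.Str.startswith p.2 "**") with ha | ha <;>
    rcases Bool.eq_false_or_eq_true (PySem.Str.isIn "|" p.2) with hb | hb <;>
    rcases Bool.eq_false_or_eq_true (PySem.Str.startswith (pvNextAt lines p.1) "**") with hc | hc <;>
    rcases Bool.eq_false_or_eq_true (PySem.Str.isIn "|" (pvNextAt lines p.1)) with hd | hd <;>
      simp_all

lemma pvIns_ge : ∀ (l : List String) (k : Nat) (f : Bool) (i : Int),
    i ∈ pvIns l k f → (k : Int) ≤ i := by
  intro l
  induction l with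
  | nil => intro k f i h; simp [pvIns] at h
  | cons x rest ih =>
    intro k f i h
    simp only [pvIns, List.mem_append] at h
    rcases h with h | h
    · split at h <;> simp_all
    · have := ih (k + 1) (pvFlag x f) i h
      push_cast at this ⊢; omega

-- A's loop computes res ++ pvSpine, given the index/next-line agreement H
lemma aLoop_eq (lines : List String) :
    ∀ (l : List String) (k : Nat) (res : List String) (f : Bool),
    (∀ j : Nat, pvNextAt lines ((k + j : Nat) : Int) = l.getD (j + 1) "") →
    ((PySem.List.enumerate l (k : Int)).foldl (aStep lines) (res, f)).1 = res ++ pvSpine l f := by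
  intro l
  induction l with
  | nil => intro k res f _; simp [PySem.List.enumerate, pvSpine]
  | cons x rest ih =>
    intro k res f H
    rw [PySem.List.enumerate_cons, List.foldl_cons, aStep_eq]
    have hnext : pvNextAt lines (k : Int) = rest.getD 0 "" := by
      have h0 := H 0
      simpa using h0
    have H' : ∀ j : Nat, pvNextAt lines ((k + 1 + j : Nat) : Int) = rest.getD (j + 1) "" := by
      intro j
      have := H (j + 1)
      have e : k + (j + 1) = k + 1 + j := by omega
      rw [e] at this
      simpa using this
    have hk1 : ((k : Int) + 1) = ((k + 1 : Nat) : Int) := by push_cast; ring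
    simp only [hnext]
    rw [hk1, ih (k + 1) _ _ H']
    simp [pvSpine, List.append_assoc]

-- B's first pass computes S ++ pvIns, under the same H and S bounded below k
lemma bPass1_eq (lines : List String) :
    ∀ (l : List String) (k : Nat) (S : List Int) (f : Bool),
    (∀ j : Nat, pvNextAt lines ((k + j : Nat) : Int) = l.getD (j + 1) "") →
    (∀ i ∈ S, i < (k : Int)) →
    ((PySem.List.enumerate l (k : Int)).foldl (bStep lines) (S, f)).1 = S ++ pvIns l k f := by
  intro l
  induction l with
  | nil => intro k S f _ _; simp [PySem.List.enumerate, pvIns]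
  | cons x rest ih =>
    intro k S f H hS
    rw [PySem.List.enumerate_cons, List.foldl_cons, bStep_eq]
    have hnext : pvNextAt lines (k : Int) = rest.getD 0 "" := by
      have h0 := H 0
      simpa using h0
    have H' : ∀ j : Nat, pvNextAt lines ((k + 1 + j : Nat) : Int) = rest.getD (j + 1) "" := by
      intro j
      have := H (j + 1)
      have e : k + (j + 1) = k + 1 + j := by omega
      rw [e] at this
      simpa using this
    have hk1 : ((k : Int) + 1) = ((k + 1 : Nat) : Int) := by push_cast; ring
    have hadd : (if pvCond x (rest.getD 0 "") (pvFlag x f) then PySem.Set.add S (k : Int) else S)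
        = S ++ (if pvCond x (rest.getD 0 "") (pvFlag x f) then [(k : Int)] else []) := by
      split
      · have hnm : (k : Int) ∉ S := fun hmem => absurd (hS _ hmem) (by omega)
        exact PySem.Set.add_of_not_mem hnm
      · simp
    simp only [hnext, hadd]
    rw [hk1, ih (k + 1) _ _ H' ?_]
    · simp [pvIns, List.append_assoc]
    · intro i hi
      rcases List.mem_append.mp hi with h | h
      · have := hS i h; push_cast; omega
      · split at h
        · simp only [List.mem_singleton] at h
          subst h; push_cast; omega
        · simp at h

lemma pvContains_mem (S : List Int) (i : Int) :
    PySem.Set.contains S i = decide (i ∈ S) := by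
  rw [PySem.Set.contains_eq_listContains]
  simp

-- B's second pass over the full index set rebuilds pvSpine
lemma bPass2_eq : ∀ (l : List String) (k : Nat) (P : List Int) (f : Bool),
    (∀ i ∈ P, i < (k : Int)) →
    (PySem.List.enumerate l (k : Int)).flatMap
      (fun p => if PySem.Set.contains (P ++ pvIns l k f) p.1 then [p.2, ""] else [p.2])
      = pvSpine l f := by
  intro l
  induction l with
  | nil => intro k P f _; simp [PySem.List.enumerate, pvIns, pvSpine]
  | cons x rest ih =>
    intro k P f hP
    rw [PySem.List.enumerate_cons, List.flatMap_cons]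
    have hk1 : ((k : Int) + 1) = ((k + 1 : Nat) : Int) := by push_cast; ring
    have hsplit : P ++ pvIns (x :: rest) k f
        = (P ++ (if pvCond x (rest.getD 0 "") (pvFlag x f) then [(k : Int)] else []))
          ++ pvIns rest (k + 1) (pvFlag x f) := by
      simp [pvIns, List.append_assoc]
    rw [hsplit]
    have hmemhead : PySem.Set.contains
        ((P ++ (if pvCond x (rest.getD 0 "") (pvFlag x f) then [(k : Int)] else []))
          ++ pvIns rest (k + 1) (pvFlag x f)) (k : Int)
        = pvCond x (rest.getD 0 "") (pvFlag x f) := by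
      rcases Bool.eq_false_or_eq_true (pvCond x (rest.getD 0 "") (pvFlag x f)) with h | h <;>
        simp only [h, Bool.false_eq_true, if_false, if_true, List.append_nil] <;>
        rw [pvContains_mem]
      · simp
      · simp only [decide_eq_false_iff_not]
        intro ht
        rcases List.mem_append.mp ht with h2 | h2
        · exact absurd (hP _ h2) (by omega)
        · have := pvIns_ge rest (k + 1) (pvFlag x f) _ h2; push_cast at this; omega
    rw [hmemhead, hk1, ih (k + 1) _ (pvFlag x f) ?_]
    · simp only [pvSpine]
      rcases Bool.eq_false_or_eq_true (pvCond x (rest.getD 0 "") (pvFlag x f)) with h | h <;>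
        simp only [h, Bool.false_eq_true, if_false, if_true] <;> simp
    · intro i hi
      rcases List.mem_append.mp hi with h | h
      · have := hP i h; push_cast; omega
      · split at h
        · simp only [List.mem_singleton] at h
          subst h; push_cast; omega
        · simp at h

-- the agreement hypothesis holds at the top level (l = lines, k = 0)
lemma H_top (lines : List String) : ∀ j : Nat,
    pvNextAt lines ((0 + j : Nat) : Int) = lines.getD (j + 1) "" := by
  intro j
  simp only [Nat.zero_add, pvNextAt]
  by_cases h : (j : Int) + 1 < (lines.length : Int)
  · rw [if_pos h]
    have : ((j : Int) + 1) = ((j + 1 : Nat) : Int) := by push_cast; ring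
    rw [this, PySem.List.pyGetD_natCast]
  · rw [if_neg h, List.getD_eq_default]
    omega

-- ===== VERDICT (by name: the statement is the Claim_ definition above) =====
theorem add_experience_role_spacing_spec : Claim_equal_add_experience_role_spacing := by
  intro text _
  unfold Spec_add_experience_role_spacing add_experience_role_spacing add_experience_role_spacing_alt
  simp only []
  have hA := aLoop_eq (pvLines text) (pvLines text) 0 [] false (H_top _)
  have hB1 := bPass1_eq (pvLines text) (pvLines text) 0 PySem.Set.empty false (H_top _)
      (by intro i hi; simp [PySem.Set.empty] at hi)
  have hB2 := bPass2_eq (pvLines text) 0 PySem.Set.empty false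
      (by intro i hi; simp [PySem.Set.empty] at hi)
  simp only [Nat.cast_zero] at hA hB1 hB2
  rw [hA, hB1, hB2]
  simp
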